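-- pv_equiv track=rewrite | github.com/jinsooPark12/programming-study | 프로그래머스/3/12987. 숫자 게임/숫자 게임.py | solution
-- ===== SOURCE A (Python) =====
-- def solution(A, B):
--     answer = 0
--     A.sort()
--     B.sort()
--     if min(A) > max(B):
--         return 0
--     while len(A) != 0:
--         num1 = A.pop(0)
--         for i in range(len(B)):
--             num2 = B.pop(0)
--             if num2 > num1:
--                 answer += 1
--                 break
--     return answer
-- ===== SOURCE B (Python) =====
-- def solution(A, B):
--     # Sort copies once and sweep with a single index into B2 (no pop(0) shifting).
--     A2 = sorted(A)
--     B2 = sorted(B)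
--     n = len(B2)
--     j = 0
--     answer = 0
--     for a in A2:
--         while j < n and B2[j] <= a:
--             j += 1
--         if j < n:
--             answer += 1
--             j += 1
--     return answer
-- ===== Notes on version B (the rewrite author's own statement) =====
-- stated objective: faster
-- what changed: Replaces the repeated pop(0) scans over both lists by a single two-pointer sweep with an index over the sorted copies (and drops the redundant min/max early return).
import Mathlib
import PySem

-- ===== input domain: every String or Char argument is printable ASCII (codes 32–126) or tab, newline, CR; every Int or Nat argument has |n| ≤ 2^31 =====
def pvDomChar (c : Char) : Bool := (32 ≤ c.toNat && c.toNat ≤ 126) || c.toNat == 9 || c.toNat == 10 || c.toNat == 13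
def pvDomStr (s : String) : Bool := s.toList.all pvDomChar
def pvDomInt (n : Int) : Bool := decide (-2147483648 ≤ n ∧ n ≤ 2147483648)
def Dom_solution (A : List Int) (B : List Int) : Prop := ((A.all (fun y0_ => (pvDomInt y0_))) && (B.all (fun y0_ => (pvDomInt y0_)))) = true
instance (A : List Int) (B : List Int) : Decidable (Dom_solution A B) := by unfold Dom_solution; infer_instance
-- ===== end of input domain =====

-- B replaces A's repeated pop(0) scans by one two-pointer sweep over sorted copies (faster,
-- measured asymptotic); equivalence is about the RETURN value only — A sorts and empties its
-- argument lists in place, B does not mutate them.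

-- ===== PORT A =====
-- the inner 'for i in range(len(B)): num2 = B.pop(0); if num2 > num1: answer += 1; break':
-- pops B from the front until an element > num1 is found (consumed); returns (0 or 1, remaining B)
def aInner (num1 : Int) : List Int → Int × List Int
  | [] => (0, [])
  | num2 :: rest => if num2 > num1 then (1, rest) else aInner num1 rest

-- the outer 'while len(A) != 0: num1 = A.pop(0); …'
def aLoop : List Int → List Int → Int → Int
  | [], _, answer => answer
  | num1 :: rest, bs, answer =>
      let p := aInner num1 bs
      aLoop rest p.2 (answer + p.1)

def solution (A : List Int) (B : List Int) : Int :=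
  let A' := PySem.List.sorted A (fun x => x) false
  let B' := PySem.List.sorted B (fun x => x) false
  match PySem.List.min? A' (fun x => x), PySem.List.max? B' (fun x => x) with
  | some mn, some mx => if mn > mx then 0 else aLoop A' B' 0
  | _, _ => 0   -- unreachable under Pre_: min/max of an empty list raises ValueError in Python

-- ===== PORT B =====
-- 'while j < n and B2[j] <= a: j += 1'
def bSkip (B2 : List Int) (a : Int) (j : Nat) : Nat :=
  if h : j < B2.length then
    if B2[j] ≤ a then bSkip B2 a (j + 1) else j
  else j
termination_by B2.length - j

-- 'for a in A2: … if j < n: answer += 1; j += 1'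
def bFold (B2 : List Int) (n : Nat) : List Int → Nat → Int → Int
  | [], _, answer => answer
  | a :: rest, j, answer =>
      let j' := bSkip B2 a j
      if j' < n then bFold B2 n rest (j' + 1) (answer + 1)
      else bFold B2 n rest j' answer

def solution_alt (A : List Int) (B : List Int) : Int :=
  let A2 := PySem.List.sorted A (fun x => x) false
  let B2 := PySem.List.sorted B (fun x => x) false
  bFold B2 B2.length A2 0 0

-- ===== PRECONDITION & SPEC =====
-- Pre_ excludes empty A or empty B: there Python A raises ValueError (min()/max() of an empty sequence).
def Pre_solution (A : List Int) (B : List Int) : Prop := A ≠ [] ∧ B ≠ []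
instance (A : List Int) (B : List Int) : Decidable (Pre_solution A B) := by unfold Pre_solution; infer_instance
def pvWitness_solution : List Int × List Int := ([1, 3, 5], [2, 4, 4])

def Spec_solution (A : List Int) (B : List Int) (out : Int) : Prop := out = solution_alt A B
instance (A : List Int) (B : List Int) (out : Int) : Decidable (Spec_solution A B out) := by unfold Spec_solution; infer_instance

-- ===== CLAIM (what is proved, stated in full; the proofs are below) =====
def Claim_equal_solution : Prop := ∀ (A : List Int) (B : List Int), Dom_solution A B → Pre_solution A B → Spec_solution A B (solution A B)

-- ===== LEMMAS AND PROOFS =====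

lemma bSkip_le (B2 : List Int) (a : Int) : ∀ k j, B2.length - j ≤ k → j ≤ B2.length → bSkip B2 a j ≤ B2.length := by
  intro k
  induction k with
  | zero =>
    intro j hk hj
    have hj' : j = B2.length := by omega
    rw [bSkip]
    simp [hj']
  | succ k ih =>
    intro j hk hj
    rw [bSkip]
    split
    · split
      · exact ih (j + 1) (by omega) (by omega)
      · exact hj
    · exact hj

lemma inner_eq (B2 : List Int) (a : Int) : ∀ k j, B2.length - j ≤ k → j ≤ B2.length →
    aInner a (B2.drop j) =
      (if bSkip B2 a j < B2.length then (1, B2.drop (bSkip B2 a j + 1)) else (0, [])) := by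
  intro k
  induction k with
  | zero =>
    intro j hk hj
    have hj' : j = B2.length := by omega
    subst hj'
    rw [bSkip]
    simp [aInner]
  | succ k ih =>
    intro j hk hj
    rcases Nat.lt_or_ge j B2.length with h | h
    · have hdrop : B2.drop j = B2[j] :: B2.drop (j + 1) := List.drop_eq_getElem_cons h
      rw [hdrop, bSkip]
      simp only [h, dif_pos]
      by_cases hle : B2[j] ≤ a
      · simp only [hle, if_pos, aInner, show ¬ B2[j] > a by omega, if_neg, not_false_iff]
        exact ih (j + 1) (by omega) (by omega)
      · simp only [hle, if_neg, not_false_iff, aInner, show B2[j] > a by omega, if_pos, h]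
    · have hj' : j = B2.length := by omega
      subst hj'
      rw [bSkip]
      simp [aInner]

lemma outer_eq (B2 : List Int) : ∀ (as : List Int) (j : Nat) (ans : Int), j ≤ B2.length →
    aLoop as (B2.drop j) ans = bFold B2 B2.length as j ans := by
  intro as
  induction as with
  | nil => intro j ans _; rfl
  | cons a rest ih =>
    intro j ans hj
    rw [aLoop, bFold]
    rw [inner_eq B2 a (B2.length - j) j (by omega) hj]
    by_cases h : bSkip B2 a j < B2.length
    · simp only [h, if_pos]
      exact ih (bSkip B2 a j + 1) (ans + 1) (by omega)
    · simp only [h, if_neg, not_false_iff]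
      have hle : bSkip B2 a j ≤ B2.length := bSkip_le B2 a (B2.length - j) j (by omega) hj
      have heq : bSkip B2 a j = B2.length := by omega
      have := ih B2.length ans (le_refl _)
      simp only [List.drop_length] at this
      rw [show (ans + (0 : Int)) = ans by ring, heq, this]

lemma aInner_none (a : Int) : ∀ bs : List Int, (∀ b ∈ bs, b ≤ a) → aInner a bs = (0, []) := by
  intro bs
  induction bs with
  | nil => intro _; rfl
  | cons b rest ih =>
    intro h
    rw [aInner]
    have hb : b ≤ a := h b (by simp)
    rw [if_neg (by omega)]
    exact ih (fun x hx => h x (by simp [hx]))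

lemma aLoop_nil_b : ∀ (as : List Int) (ans : Int), aLoop as [] ans = ans := by
  intro as
  induction as with
  | nil => intro ans; rfl
  | cons a rest ih =>
    intro ans
    rw [aLoop]
    simp only [aInner]
    rw [show (ans + (0 : Int)) = ans by ring]
    exact ih ans

-- ===== VERDICT (by name: the statement is the Claim_ definition above) =====
theorem solution_spec : Claim_equal_solution := by
  intro A B _ hpre
  simp only [Spec_solution, solution, solution_alt]
  set A' := PySem.List.sorted A (fun x => x) false with hA'
  set B' := PySem.List.sorted B (fun x => x) false with hB'
  have hA'ne : A' ≠ [] := by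
    rw [hA', Ne, PySem.List.sorted_eq_nil_iff]; exact hpre.1
  have hB'ne : B' ≠ [] := by
    rw [hB', Ne, PySem.List.sorted_eq_nil_iff]; exact hpre.2
  have hmain : aLoop A' B' 0 = bFold B' B'.length A' 0 0 := by
    have := outer_eq B' A' 0 0 (Nat.zero_le _)
    simpa using this
  rcases hmn : PySem.List.min? A' (fun x => x) with _ | mn
  · exact absurd ((PySem.List.min?_eq_none_iff _ _).mp hmn) hA'ne
  rcases hmx : PySem.List.max? B' (fun x => x) with _ | mx
  · exact absurd ((PySem.List.max?_eq_none_iff _ _).mp hmx) hB'ne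

  simp only
  by_cases hgt : mn > mx
  · rw [if_pos hgt, ← hmain]
    -- every element of B' is ≤ mx < mn ≤ every element of A', so the loop counts nothing
    rcases hAc : A' with _ | ⟨a, rest⟩
    · rfl
    · have hmn_le : mn ≤ a := by
        have := PySem.List.min?_isMin hmn a (by rw [hAc]; simp)
        simpa using this
      have hbs : ∀ b ∈ B', b ≤ a := by
        intro b hb
        have := PySem.List.max?_isMax hmx b hb
        simp only at this
        omega
      rw [aLoop, aInner_none a B' hbs]
      simp only
      rw [show ((0 : Int) + 0) = 0 by ring, aLoop_nil_b]
  · rw [if_neg hgt, hmain]
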